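-- pv_equiv track=rewrite | github.com/AliSoua/ds_asd_cryptage | Sub_Functions.py | transpose_matrix_decipher
-- ===== SOURCE A (Python) =====
-- def transpose_matrix_decipher(message, key):
--     num_cols = len(message) // key + (1 if len(message) % key != 0 else 0)
--     matrix = [[''] * num_cols for _ in range(key)]
--     idx = 0
--     for col in range(num_cols):
--         for row in range(key):
--             if idx < len(message):
--                 matrix[row][col] = message[idx]
--                 idx += 1
--             else:
--                 break
--     result = ""
--     for row in range(key):
--         for col in range(num_cols):
--             result += matrix[row][col]
--
--     return result
-- ===== SOURCE B (Python) =====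
-- def transpose_matrix_decipher(message, key):
--     # Reading the column-major-filled key x num_cols grid row by row is exactly
--     # the stride slices message[r::key], one per row; join them directly.
--     # (range(key) is empty for key <= 0, giving "" for negative keys like A;
--     # A raises ZeroDivisionError at key == 0, where this returns "".)
--     return ''.join(message[r::key] for r in range(key))
-- ===== Notes on version B (the rewrite author's own statement) =====
-- stated objective: idiomatic
-- what changed: Drops the explicit key x num_cols matrix fill-and-read entirely and joins the stride slices message[r::key] for each row r, removing per-cell list construction and per-character string appends.
import Mathlib
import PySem

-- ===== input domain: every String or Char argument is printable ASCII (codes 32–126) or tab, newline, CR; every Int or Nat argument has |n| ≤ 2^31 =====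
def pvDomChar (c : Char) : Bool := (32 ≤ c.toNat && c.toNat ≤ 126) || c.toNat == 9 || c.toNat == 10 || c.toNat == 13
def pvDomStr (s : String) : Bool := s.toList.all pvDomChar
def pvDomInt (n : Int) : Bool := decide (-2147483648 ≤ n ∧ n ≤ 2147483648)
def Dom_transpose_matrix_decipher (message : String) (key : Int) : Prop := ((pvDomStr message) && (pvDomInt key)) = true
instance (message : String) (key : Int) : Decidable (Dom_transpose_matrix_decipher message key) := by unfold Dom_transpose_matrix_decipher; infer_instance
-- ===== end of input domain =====

-- B drops A's explicit key×num_cols matrix fill-and-read and instead joins the stride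
-- slices message[r::key], one per row (idiomatic rewrite; return values proved equal for key ≠ 0).


-- ===== PORT A =====
-- literal transliteration of A; the inner loop's 'break' is modelled as a no-op tail:
-- idx only grows, so once idx ≥ len(message) no later iteration writes, exactly as break.
def transpose_matrix_decipher (message : String) (key : Int) : String :=
  let m := message.toList
  -- num_cols = len(message) // key + (1 if len(message) % key != 0 else 0)   (key ≠ 0 by Pre_)
  let num_cols : Int :=
    PySem.Int.floordiv (m.length : Int) key +
      (if PySem.Int.mod (m.length : Int) key ≠ 0 then 1 else 0)
  -- matrix = [[''] * num_cols for _ in range(key)]   (each cell a string, '' = [])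
  let matrix0 : List (List (List Char)) :=
    (PySem.List.pyRange 0 key 1).map (fun _ => List.replicate num_cols.toNat ([] : List Char))
  -- column-major fill; state = (matrix, idx); message[idx] via pyGetD (idx is in range whenever read)
  let fill : List (List (List Char)) × Nat :=
    (PySem.List.pyRange 0 num_cols 1).foldl (fun st col =>
      (PySem.List.pyRange 0 key 1).foldl (fun (st : List (List (List Char)) × Nat) row =>
        if st.2 < m.length then
          (st.1.modify row.toNat (fun rowl => rowl.set col.toNat [PySem.List.pyGetD m (st.2 : Int) ' ']),
           st.2 + 1)
        else st) st) (matrix0, 0)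
  -- result += matrix[row][col], row-major
  let result : List Char :=
    (PySem.List.pyRange 0 key 1).foldl (fun acc row =>
      (PySem.List.pyRange 0 num_cols 1).foldl (fun acc col =>
        acc ++ PySem.List.pyGetD (PySem.List.pyGetD fill.1 row []) col []) acc) []
  String.ofList result

-- ===== PORT B =====
-- ''.join(message[r::key] for r in range(key)); the '.getD []' is unreachable:
-- slice? is none only for step = 0, and pyRange 0 0 1 = [].
def transpose_matrix_decipher_alt (message : String) (key : Int) : String :=
  String.ofList ((PySem.List.pyRange 0 key 1).flatMap (fun r =>
    (PySem.List.slice? message.toList (some r) none key).getD []))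

-- ===== PRECONDITION & SPEC =====
-- Pre_ excludes exactly key = 0, where A raises ZeroDivisionError.
def Pre_transpose_matrix_decipher (message : String) (key : Int) : Prop := key ≠ 0
instance (message : String) (key : Int) : Decidable (Pre_transpose_matrix_decipher message key) := by
  unfold Pre_transpose_matrix_decipher; infer_instance
def pvWitness_transpose_matrix_decipher : String × Int := ("HELLOWORLD", 3)

def Spec_transpose_matrix_decipher (message : String) (key : Int) (out : String) : Prop :=
  out = transpose_matrix_decipher_alt message key
instance (message : String) (key : Int) (out : String) : Decidable (Spec_transpose_matrix_decipher message key out) := by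
  unfold Spec_transpose_matrix_decipher; infer_instance

-- ===== CLAIM (what is proved, stated in full; the proofs are below) =====
def Claim_equal_transpose_matrix_decipher : Prop := ∀ (message : String) (key : Int), Dom_transpose_matrix_decipher message key → Pre_transpose_matrix_decipher message key → Spec_transpose_matrix_decipher message key (transpose_matrix_decipher message key)

-- ===== LEMMAS AND PROOFS =====

def pvEntry (m : List Char) (K n r c : Nat) : List Char :=
  if c * K + r < n then [m.getD (c * K + r) ' '] else []
def pvMat (m : List Char) (K C n c r : Nat) : List (List (List Char)) :=
  (List.range K).map (fun row => (List.range C).map (fun col =>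
    if col < c ∨ (col = c ∧ row < r) then pvEntry m K n row col else []))

theorem pvLD (K n r c : Nat) (hK : 0 < K) : c * K + r < n ↔ c < (n - r + K - 1) / K := by
  have h : c < (n - r + K - 1) / K ↔ c * K + K ≤ n - r + K - 1 := by
    rw [Nat.lt_iff_add_one_le, Nat.le_div_iff_mul_le hK, show (c + 1) * K = c * K + K from by ring]
  rw [h]
  omega

theorem pvInnerStep (m : List Char) (K C n c s : Nat) :
    (if (min n (c * K + s)) < n then
      ((pvMat m K C n c s).modify s (fun rowl => rowl.set c [m.getD (min n (c * K + s)) ' ']),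
        (min n (c * K + s)) + 1)
     else (pvMat m K C n c s, min n (c * K + s)))
    = (pvMat m K C n c (s + 1), min n (c * K + (s + 1))) := by
  by_cases hlt : c * K + s < n
  · rw [if_pos (by omega)]
    refine Prod.ext ?_ (by simp; omega)
    simp only [Nat.min_eq_right (le_of_lt hlt)]
    apply List.ext_getElem (by simp [pvMat])
    intro i h1 h2
    have hiK : i < K := by simpa [pvMat] using h2
    simp only [pvMat, List.getElem_modify, List.getElem_map, List.getElem_range]
    by_cases hi : s = i
    · rw [if_pos hi]
      apply List.ext_getElem (by simp)
      intro j h3 h4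
      have hjC : j < C := by simpa using h4
      simp only [List.getElem_set, List.getElem_map, List.getElem_range]
      by_cases hj : c = j
      · rw [if_pos hj, if_pos (by omega : j < c ∨ (j = c ∧ i < s + 1))]
        simp only [pvEntry, ← hj, ← hi, if_pos hlt]
      · rw [if_neg hj]
        exact if_congr (by omega) rfl rfl
    · rw [if_neg hi]
      apply List.ext_getElem (by simp)
      intro j h3 h4
      simp only [List.getElem_map, List.getElem_range]
      exact if_congr (by omega) rfl rfl
  · rw [if_neg (by omega)]
    refine Prod.ext ?_ (by simp; omega)
    apply List.ext_getElem (by simp [pvMat])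
    intro i h1 h2
    simp only [pvMat, List.getElem_map, List.getElem_range]
    apply List.ext_getElem (by simp)
    intro j h3 h4
    have hjC : j < C := by simpa using h4
    simp only [List.getElem_map, List.getElem_range]
    by_cases h1c : j < c ∨ (j = c ∧ i < s)
    · rw [if_pos h1c, if_pos (by omega : j < c ∨ (j = c ∧ i < s + 1))]
    · rw [if_neg h1c]
      by_cases h2c : j < c ∨ (j = c ∧ i < s + 1)
      · rw [if_pos h2c]
        have hji : j = c ∧ i = s := by omega
        simp only [pvEntry, hji.1, hji.2, if_neg hlt]
      · rw [if_neg h2c]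

theorem pvColWrap (m : List Char) (K C n c : Nat) :
    pvMat m K C n c K = pvMat m K C n (c + 1) 0 := by
  simp only [pvMat]
  apply List.ext_getElem (by simp)
  intro i h1 h2
  have hiK : i < K := by simpa using h1
  simp only [List.getElem_map, List.getElem_range]
  apply List.ext_getElem (by simp)
  intro j h3 h4
  simp only [List.getElem_map, List.getElem_range]
  exact if_congr (by omega) rfl rfl

theorem pvInner (m : List Char) (K C n c : Nat) :
    ∀ (l s : Nat), s + l = K →
    (List.range' s l).foldl (fun (st : List (List (List Char)) × Nat) (row : Nat) =>
        if st.2 < n then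
          (st.1.modify row (fun rowl => rowl.set c [m.getD st.2 ' ']), st.2 + 1)
        else st)
      (pvMat m K C n c s, min n (c * K + s))
    = (pvMat m K C n c K, min n (c * K + K)) := by
  intro l
  induction l with
  | zero => intro s hs; simp [show s = K by omega]
  | succ l ih =>
    intro s hs
    rw [List.range'_succ, List.foldl_cons]
    have step := pvInnerStep m K C n c s
    simp only at step ⊢
    rw [step]
    exact ih (s + 1) (by omega)

theorem pvOuter (m : List Char) (K C n : Nat) :
    ∀ (l c : Nat), c + l = C →
    (List.range' c l).foldl (fun (st : List (List (List Char)) × Nat) (col : Nat) =>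
        (List.range' 0 K).foldl (fun (st : List (List (List Char)) × Nat) (row : Nat) =>
          if st.2 < n then
            (st.1.modify row (fun rowl => rowl.set col [m.getD st.2 ' ']), st.2 + 1)
          else st) st)
      (pvMat m K C n c 0, min n (c * K))
    = (pvMat m K C n C 0, min n (C * K)) := by
  intro l
  induction l with
  | zero => intro c hc; simp [show c = C by omega]
  | succ l ih =>
    intro c hc
    rw [List.range'_succ, List.foldl_cons]
    have inner := pvInner m K C n c K 0 (by omega)
    simp only [Nat.zero_add, Nat.add_zero] at inner
    rw [inner, pvColWrap, show c * K + K = (c + 1) * K from by ring]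
    exact ih (c + 1) (by omega)

def pvStride (m : List Char) (K r : Nat) : List Char :=
  (List.range ((m.length - r + K - 1) / K)).map (fun j => m.getD (j * K + r) ' ')

theorem pvRowFlat (m : List Char) (K C r : Nat) (hK : 0 < K) (hC : m.length ≤ K * C) :
    (List.range C).flatMap (fun c => pvEntry m K m.length r c) = pvStride m K r := by
  have hle : (m.length - r + K - 1) / K ≤ C := by
    by_contra h
    have h2 := (pvLD K m.length r C hK).mpr (by omega)
    nlinarith
  rw [show C = (m.length - r + K - 1) / K + (C - (m.length - r + K - 1) / K) from by omega,
      List.range_add, List.flatMap_append]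
  have h1 : (List.range ((m.length - r + K - 1) / K)).flatMap (fun c => pvEntry m K m.length r c)
      = pvStride m K r := by
    rw [pvStride, List.map_eq_flatMap]
    apply List.flatMap_congr
    intro c hcmem
    rw [pvEntry, if_pos ((pvLD K m.length r c hK).mpr (List.mem_range.mp hcmem))]
  have h2 : (((List.range (C - (m.length - r + K - 1) / K)).map
        (fun j => (m.length - r + K - 1) / K + j))).flatMap (fun c => pvEntry m K m.length r c) = [] := by
    apply List.flatMap_eq_nil_iff.mpr
    intro c hcmem
    simp only [List.mem_map, List.mem_range] at hcmem
    obtain ⟨j, hj, rfl⟩ := hcmem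
    rw [pvEntry, if_neg]
    intro h
    have := (pvLD K m.length r _ hK).mp h
    omega
  rw [h1, h2, List.append_nil]

theorem pvNumCols (n K : Nat) (hK : 0 < K) :
    PySem.Int.floordiv (n : Int) (K : Int) +
      (if PySem.Int.mod (n : Int) (K : Int) ≠ 0 then 1 else 0)
    = (((n + K - 1) / K : Nat) : Int) := by
  rw [PySem.Int.floordiv_natCast, PySem.Int.mod_natCast]
  by_cases h : n % K = 0
  · rw [h, show ((0:Nat):Int) = 0 from rfl, if_neg (by simp)]
    obtain ⟨q, rfl⟩ := Nat.dvd_of_mod_eq_zero h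
    have e1 : K * q / K = q := Nat.mul_div_cancel_left q hK
    have e2 : (K * q + K - 1) / K = q := by
      rw [Nat.add_sub_assoc (by omega : 1 ≤ K), Nat.mul_add_div hK,
          Nat.div_eq_of_lt (by omega), add_zero]
    rw [e1, e2, add_zero]
  · rw [if_pos (by exact_mod_cast h)]
    obtain ⟨p, hp⟩ : ∃ p, K * (n / K) = p := ⟨_, rfl⟩
    have hdm := Nat.div_add_mod n K
    rw [hp] at hdm
    have hslt : n % K < K := Nat.mod_lt n hK
    have e : n + K - 1 = K * (n / K + 1) + (n % K - 1) := by
      have e' : K * (n / K + 1) = p + K := by rw [Nat.mul_add, Nat.mul_one, hp]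
      rw [e']; omega
    rw [e, Nat.mul_add_div hK, Nat.div_eq_of_lt (show n % K - 1 < K by omega), add_zero]
    push_cast
    ring


theorem pvSliceEq (m : List Char) (K r : Nat) (hK : 0 < K) :
    PySem.List.slice? m (some (r : Int)) none (K : Int) = some (pvStride m K r) := by
  have hKne : ((K : Int)) ≠ 0 := by exact_mod_cast hK.ne'
  have hKpos : (0 : Int) < (K : Int) := by exact_mod_cast hK
  rw [PySem.List.slice?, if_neg hKne, PySem.List.sliceIndices]
  simp only [if_neg (by omega : ¬ ((K:Int) < 0)), if_neg (by omega : ¬ ((r:Int) < 0)), if_pos hKpos]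
  rcases Nat.lt_or_ge r m.length with hr | hr
  · have hstart : min (r : Int) (m.length : Int) = (r : Int) := by omega
    rw [hstart, if_pos (by exact_mod_cast hr)]
    have hcnt : (((m.length : Int) - r + K - 1) / K).toNat = (m.length - r + K - 1) / K := by
      have e1 : ((m.length : Int) - r + K - 1) = ((m.length - r + K - 1 : Nat) : Int) := by omega
      rw [e1, ← Int.natCast_div]
      exact Int.toNat_natCast _
    rw [hcnt, pvStride]
    refine congrArg some (List.filterMap_eq_map_iff_forall_eq_some.mpr ?_)
    intro k hk
    have hklt : k * K + r < m.length := (pvLD K m.length r k hK).mpr (List.mem_range.mp hk)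
    have hidx : ((r : Int) + K * k).toNat = k * K + r := by
      have : ((r : Int) + K * k) = ((k * K + r : Nat) : Int) := by push_cast; ring
      rw [this, Int.toNat_natCast]
    rw [hidx, List.getElem?_eq_getElem hklt, List.getD_eq_getElem m ' ' hklt]
  · have hstart : min (r : Int) (m.length : Int) = (m.length : Int) := by omega
    rw [hstart, if_neg (by omega), pvStride,
        show (m.length - r + K - 1) / K = 0 from by rw [show m.length - r = 0 from by omega]; exact Nat.div_eq_of_lt (by omega)]
    simp

theorem pvBSide (message : String) (K : Nat) (hK : 0 < K) :
    transpose_matrix_decipher_alt message (K : Int)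
      = String.ofList ((List.range K).flatMap (fun r => pvStride message.toList K r)) := by
  unfold transpose_matrix_decipher_alt
  rw [PySem.List.pyRange_zero_nat, List.flatMap_map]
  refine congrArg _ (List.flatMap_congr ?_)
  intro r hr
  rw [pvSliceEq message.toList K r hK]
  rfl


theorem pvFill (msg : List Char) (K C : Nat) (hK : 0 < K) :
    (List.foldl
        (fun (st : List (List (List Char)) × Nat) (col : Int) =>
          List.foldl
            (fun (st : List (List (List Char)) × Nat) (row : Int) =>
              if st.2 < msg.length then
                (st.1.modify row.toNat fun rowl =>
                    rowl.set col.toNat [PySem.List.pyGetD msg (↑st.2) ' '],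
                  st.2 + 1)
              else st)
            st (List.map (fun (k : Nat) => (k : Int)) (List.range K)))
        (List.map (fun (_ : Int) => List.replicate C ([] : List Char))
            (List.map (fun (k : Nat) => (k : Int)) (List.range K)),
          0)
        (List.map (fun (k : Nat) => (k : Int)) (List.range C))).1
    = pvMat msg K C msg.length C 0 := by
  rw [List.foldl_map]
  have hfun : ∀ (st : List (List (List Char)) × Nat), ∀ col ∈ List.range C,
      (List.foldl
        (fun (st : List (List (List Char)) × Nat) (row : Int) =>
          if st.2 < msg.length then
            (st.1.modify row.toNat fun rowl =>
                rowl.set ((col : Int)).toNat [PySem.List.pyGetD msg (↑st.2) ' '],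
              st.2 + 1)
          else st)
        st (List.map (fun (k : Nat) => (k : Int)) (List.range K)))
      = (List.range' 0 K).foldl
          (fun (st : List (List (List Char)) × Nat) (row : Nat) =>
            if st.2 < msg.length then
              (st.1.modify row (fun rowl => rowl.set col [msg.getD st.2 ' ']), st.2 + 1)
            else st) st := by
    intro st col _
    rw [List.foldl_map, ← List.range_eq_range']
    apply PySem.List.foldl_congr_mem
    intro acc row _
    simp [PySem.List.pyGetD_natCast]
  rw [PySem.List.foldl_congr_mem (List.range C)
      (fun (st : List (List (List Char)) × Nat) (col : Nat) =>
        List.foldl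
          (fun (st : List (List (List Char)) × Nat) (row : Int) =>
            if st.2 < msg.length then
              (st.1.modify row.toNat fun rowl =>
                  rowl.set ((col : Int)).toNat [PySem.List.pyGetD msg (↑st.2) ' '],
                st.2 + 1)
            else st)
          st (List.map (fun (k : Nat) => (k : Int)) (List.range K)))
      (fun (st : List (List (List Char)) × Nat) (col : Nat) =>
        (List.range' 0 K).foldl
          (fun (st : List (List (List Char)) × Nat) (row : Nat) =>
            if st.2 < msg.length then
              (st.1.modify row (fun rowl => rowl.set col [msg.getD st.2 ' ']), st.2 + 1)
            else st) st)
      _ hfun]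
  have hmat0 : (List.map (fun (_ : Int) => List.replicate C ([] : List Char))
      (List.map (fun (k : Nat) => (k : Int)) (List.range K))) = pvMat msg K C msg.length 0 0 := by
    simp only [pvMat, List.map_map]
    apply List.ext_getElem (by simp)
    intro i h1 h2
    simp only [List.getElem_map, List.getElem_range, Function.comp]
    rw [show (List.map (fun col => if col < 0 ∨ (col = 0 ∧ i < 0) then pvEntry msg K msg.length i col else []) (List.range C)) = List.map (fun _ => ([] : List Char)) (List.range C) from List.map_congr_left (by intro a _; rw [if_neg (by omega)]), List.map_const', List.length_range]
  rw [hmat0, List.range_eq_range',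
      show ((pvMat msg K C msg.length 0 0, 0) : List (List (List Char)) × Nat)
        = (pvMat msg K C msg.length 0 0, min msg.length (0 * K)) from by simp,
      pvOuter msg K C msg.length C 0 (by omega)]

theorem pvRead (msg : List Char) (K C : Nat) (hK : 0 < K) (hC : msg.length ≤ K * C) :
    (List.foldl
        (fun (acc : List Char) (row : Int) =>
          List.foldl
            (fun (acc : List Char) (col : Int) =>
              acc ++ PySem.List.pyGetD (PySem.List.pyGetD (pvMat msg K C msg.length C 0) row []) col [])
            acc (List.map (fun (k : Nat) => (k : Int)) (List.range C)))
        [] (List.map (fun (k : Nat) => (k : Int)) (List.range K)))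
    = (List.range K).flatMap (fun r => pvStride msg K r) := by
  rw [List.foldl_map]
  have hrowfun : ∀ (acc : List Char), ∀ row ∈ List.range K,
      (List.foldl
        (fun (acc : List Char) (col : Int) =>
          acc ++ PySem.List.pyGetD (PySem.List.pyGetD (pvMat msg K C msg.length C 0) ((row : Nat) : Int) []) col [])
        acc (List.map (fun (k : Nat) => (k : Int)) (List.range C)))
      = acc ++ (List.range C).flatMap (fun c => pvEntry msg K msg.length row c) := by
    intro acc row hrow
    have hrowK : row < K := List.mem_range.mp hrow
    rw [List.foldl_map]
    have hget : PySem.List.pyGetD (pvMat msg K C msg.length C 0) ((row : Nat) : Int) []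
        = (List.range C).map (fun col => if col < C ∨ (col = C ∧ row < 0) then pvEntry msg K msg.length row col else []) := by
      rw [PySem.List.pyGetD_natCast, pvMat,
          List.getD_eq_getElem _ _ (by simpa using hrowK), List.getElem_map, List.getElem_range]
    rw [hget]
    have hcolfun : ∀ (acc : List Char), ∀ c ∈ List.range C,
        acc ++ PySem.List.pyGetD ((List.range C).map (fun col => if col < C ∨ (col = C ∧ row < 0) then pvEntry msg K msg.length row col else [])) ((c : Nat) : Int) []
        = acc ++ pvEntry msg K msg.length row c := by
      intro acc2 c hc
      have hcC : c < C := List.mem_range.mp hc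
      rw [PySem.List.pyGetD_natCast, List.getD_eq_getElem _ _ (by simpa using hcC),
          List.getElem_map, List.getElem_range, if_pos (Or.inl hcC)]
    rw [PySem.List.foldl_congr_mem (List.range C)
        (fun (acc : List Char) (c : Nat) =>
          acc ++ PySem.List.pyGetD ((List.range C).map (fun col => if col < C ∨ (col = C ∧ row < 0) then pvEntry msg K msg.length row col else [])) ((c : Nat) : Int) [])
        (fun (acc : List Char) (c : Nat) => acc ++ pvEntry msg K msg.length row c)
        _ hcolfun,
      PySem.List.foldl_append_eq_flatMap]
  rw [PySem.List.foldl_congr_mem (List.range K)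
      (fun (acc : List Char) (row : Nat) =>
        List.foldl
          (fun (acc : List Char) (col : Int) =>
            acc ++ PySem.List.pyGetD (PySem.List.pyGetD (pvMat msg K C msg.length C 0) ((row : Nat) : Int) []) col [])
          acc (List.map (fun (k : Nat) => (k : Int)) (List.range C)))
      (fun (acc : List Char) (row : Nat) =>
        acc ++ (List.range C).flatMap (fun c => pvEntry msg K msg.length row c))
      _ hrowfun,
    PySem.List.foldl_append_eq_flatMap, List.nil_append]
  exact List.flatMap_congr (fun r _ => pvRowFlat msg K C r hK hC)

theorem pvASide (message : String) (K : Nat) (hK : 0 < K) :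
    transpose_matrix_decipher message (K : Int)
      = String.ofList ((List.range K).flatMap (fun r => pvStride message.toList K r)) := by
  have hC : message.toList.length ≤ K * ((message.toList.length + K - 1) / K) := by
    by_contra h
    have h2 : ((message.toList.length + K - 1) / K) * K + 0 < message.toList.length := by
      rw [Nat.mul_comm]; omega
    have h3 := (pvLD K message.toList.length 0 _ hK).mp h2
    rw [Nat.sub_zero] at h3
    omega
  simp only [transpose_matrix_decipher]
  rw [pvNumCols message.toList.length K hK, Int.toNat_natCast,
      PySem.List.pyRange_zero_nat K, PySem.List.pyRange_zero_nat ((message.toList.length + K - 1) / K)]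
  rw [pvFill message.toList K ((message.toList.length + K - 1) / K) hK]
  rw [pvRead message.toList K ((message.toList.length + K - 1) / K) hK hC]

theorem pvMain (message : String) (key : Int) (hkey : key ≠ 0) :
    transpose_matrix_decipher message key = transpose_matrix_decipher_alt message key := by
  rcases lt_or_gt_of_ne hkey with hneg | hpos
  · simp only [transpose_matrix_decipher, transpose_matrix_decipher_alt]
    rw [PySem.List.pyRange_one_eq_nil (by omega : key ≤ 0)]
    simp
  · obtain ⟨K, rfl⟩ : ∃ K : Nat, key = (K : Int) :=
      ⟨key.toNat, (Int.toNat_of_nonneg (by omega)).symm⟩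
    have hK : 0 < K := by exact_mod_cast hpos
    rw [pvASide message K hK, pvBSide message K hK]

-- ===== VERDICT (by name: the statement is the Claim_ definition above) =====
theorem transpose_matrix_decipher_spec : Claim_equal_transpose_matrix_decipher := by
  intro message key _ hpre
  exact pvMain message key hpre
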